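-- pv_equiv track=rewrite | github.com/LUISNAAL8435/Lenguaje | OptimizadorTac.py | combinar_literal_con_operacion
-- ===== SOURCE A (Python) =====
-- def combinar_literal_con_operacion(cuadruplas):
--     """Combina literales con operaciones que los usan inmediatamente"""
--     nuevas = []
--     i = 0
--     n = len(cuadruplas)
--
--     while i < n:
--         op, arg1, arg2, res = cuadruplas[i]
--
--         # Caso: literal seguido de pinMode/OUT que lo usa
--         if op == 'literal' and i + 1 < n:
--             next_op, next_arg1, next_arg2, next_res = cuadruplas[i + 1]
--
--             # Si la siguiente operación usa este literal
--             if next_arg2 == res and next_op in ['pinMode', 'OUT', 'readPin']: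
--                 # Combinar: usar el valor directamente
--                 if next_op == 'pinMode':
--                     if arg1 == 'INPUT':
--                         nuevas.append(('pinMode', next_arg1, 'INPUT', next_res))
--                     else:
--                         nuevas.append(('pinMode', next_arg1, 'OUTPUT', next_res))
--                 elif next_op == 'OUT':
--                     if arg1 == '1':
--                         nuevas.append(('OUT', next_arg1, 'HIGH', next_res))
--                     else:
--                         nuevas.append(('OUT', next_arg1, 'LOW', next_res))
--                 elif next_op == 'readPin':
--                     nuevas.append(('readPin', next_arg1, '-', next_res))
--
--                 i += 2  # Saltar ambas
--                 continue
--
--         # Caso: literal '1' o '0' seguido de asignación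
--         elif op == 'literal' and arg1 in ['1', '0'] and res.startswith('t'):
--             # Verificar si se usa inmediatamente
--             if i + 1 < n:
--                 next_op, next_arg1, next_arg2, next_res = cuadruplas[i + 1]
--                 if next_op == '=' and next_arg1 == res:
--                     # Combinar
--                     nuevas.append(('=', arg1, '-', next_res))
--                     i += 2
--                     continue
--
--         nuevas.append((op, arg1, arg2, res))
--         i += 1
--
--     return nuevas
-- ===== SOURCE B (Python) =====
-- def combinar_literal_con_operacion(cuadruplas):
--     """Single forward pass with a one-element pending-literal buffer."""
--     nuevas = []
--     pending = None  # a ('literal', arg1, arg2, res) quad waiting for a consumer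
--
--     for quad in cuadruplas:
--         op, arg1, arg2, res = quad
--         if pending is not None and op in ('pinMode', 'OUT', 'readPin') and arg2 == pending[3]:
--             lit_arg1 = pending[1]
--             if op == 'pinMode':
--                 mode = 'INPUT' if lit_arg1 == 'INPUT' else 'OUTPUT'
--                 nuevas.append(('pinMode', arg1, mode, res))
--             elif op == 'OUT':
--                 level = 'HIGH' if lit_arg1 == '1' else 'LOW'
--                 nuevas.append(('OUT', arg1, level, res))
--             else:
--                 nuevas.append(('readPin', arg1, '-', res))
--             pending = None
--         else:
--             if pending is not None:
--                 nuevas.append(pending)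
--                 pending = None
--             if op == 'literal':
--                 pending = quad
--             else:
--                 nuevas.append(quad)
--
--     if pending is not None:
--         nuevas.append(pending)
--     return nuevas
-- ===== Notes on version B (the rewrite author's own statement) =====
-- stated objective: simpler
-- what changed: Replaced the index-based while loop with i+1 look-ahead (and a dead literal-'1'/'0'-plus-'=' branch) by a single forward for-loop carrying a one-element pending-literal buffer that is either consumed by the next quad or flushed.
import Mathlib
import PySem

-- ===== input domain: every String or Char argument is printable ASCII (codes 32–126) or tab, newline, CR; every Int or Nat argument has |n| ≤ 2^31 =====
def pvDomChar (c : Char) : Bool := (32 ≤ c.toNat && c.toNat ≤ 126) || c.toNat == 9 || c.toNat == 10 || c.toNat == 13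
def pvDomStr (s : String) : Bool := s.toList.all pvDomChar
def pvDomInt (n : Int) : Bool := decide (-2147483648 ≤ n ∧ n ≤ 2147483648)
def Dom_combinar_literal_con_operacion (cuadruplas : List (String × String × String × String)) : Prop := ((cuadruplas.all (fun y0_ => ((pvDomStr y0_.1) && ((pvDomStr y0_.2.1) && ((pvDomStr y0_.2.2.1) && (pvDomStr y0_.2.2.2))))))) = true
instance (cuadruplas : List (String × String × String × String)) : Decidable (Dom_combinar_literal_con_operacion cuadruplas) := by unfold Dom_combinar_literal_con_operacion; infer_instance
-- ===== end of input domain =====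

-- B replaces A's index while-loop with i+1 look-ahead (and its dead literal-'1'/'0'-plus-'=' branch)
-- by a single forward pass carrying a one-element pending-literal buffer; objective: simpler.

-- ===== PORT A =====
-- A's while loop over index i, advancing by 1 or 2, ported as structural recursion on the
-- suffix cuadruplas[i:]; the two-element case exposes cuadruplas[i] and cuadruplas[i+1].
def combinarA : List (String × String × String × String) → List (String × String × String × String)
  | [] => []
  | [q] =>
      -- i + 1 < n is false: the first branch's guard fails; the elif branch's inner
      -- 'if i + 1 < n' also fails, so in every case the quad is appended and i += 1.
      [q]
  | q :: q2 :: rest' =>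
      -- if op == 'literal' and i + 1 < n:
      if q.1 == "literal" then
        -- if next_arg2 == res and next_op in ['pinMode', 'OUT', 'readPin']:
        if q2.2.2.1 == q.2.2.2 && (q2.1 == "pinMode" || q2.1 == "OUT" || q2.1 == "readPin") then
          (if q2.1 == "pinMode" then
            (if q.2.1 == "INPUT" then ("pinMode", q2.2.1, "INPUT", q2.2.2.2)
             else ("pinMode", q2.2.1, "OUTPUT", q2.2.2.2))
           else if q2.1 == "OUT" then
            (if q.2.1 == "1" then ("OUT", q2.2.1, "HIGH", q2.2.2.2)
             else ("OUT", q2.2.1, "LOW", q2.2.2.2))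
           else ("readPin", q2.2.1, "-", q2.2.2.2)) :: combinarA rest'
        else
          q :: combinarA (q2 :: rest')
      -- elif op == 'literal' and arg1 in ['1', '0'] and res.startswith('t'):
      -- (reached only when op != 'literal', hence never taken; transliterated nonetheless)
      else if q.1 == "literal" && ((q.2.1 == "1" || q.2.1 == "0") && PySem.Str.startswith q.2.2.2 "t") then
        if q2.1 == "=" && q2.2.1 == q.2.2.2 then ("=", q.2.1, "-", q2.2.2.2) :: combinarA rest'
        else q :: combinarA (q2 :: rest')
      else
        q :: combinarA (q2 :: rest')
termination_by l => l.length
decreasing_by all_goals simp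

def combinar_literal_con_operacion (cuadruplas : List (String × String × String × String)) : List (String × String × String × String) :=
  combinarA cuadruplas

-- ===== PORT B =====
-- Source B: forward pass with a one-element pending-literal buffer (the Option argument).
def combinarB : Option (String × String × String × String) → List (String × String × String × String) → List (String × String × String × String)
  | none, [] => []
  | some p, [] => [p]
  | pending, q :: rest =>
    match pending with
    | some p =>
      if (q.1 == "pinMode" || q.1 == "OUT" || q.1 == "readPin") && q.2.2.1 == p.2.2.2 then
        (if q.1 == "pinMode" then
          ("pinMode", q.2.1, (if p.2.1 == "INPUT" then "INPUT" else "OUTPUT"), q.2.2.2)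
         else if q.1 == "OUT" then
          ("OUT", q.2.1, (if p.2.1 == "1" then "HIGH" else "LOW"), q.2.2.2)
         else ("readPin", q.2.1, "-", q.2.2.2)) :: combinarB none rest
      else if q.1 == "literal" then p :: combinarB (some q) rest
      else p :: q :: combinarB none rest
    | none =>
      if q.1 == "literal" then combinarB (some q) rest
      else q :: combinarB none rest

def combinar_literal_con_operacion_alt (cuadruplas : List (String × String × String × String)) : List (String × String × String × String) :=
  combinarB none cuadruplas

-- ===== PRECONDITION & SPEC =====
def Spec_combinar_literal_con_operacion (cuadruplas : List (String × String × String × String)) (out : List (String × String × String × String)) : Prop := out = combinar_literal_con_operacion_alt cuadruplas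
instance (cuadruplas : List (String × String × String × String)) (out : List (String × String × String × String)) : Decidable (Spec_combinar_literal_con_operacion cuadruplas out) := by unfold Spec_combinar_literal_con_operacion; infer_instance

-- ===== CLAIM (what is proved, stated in full; the proofs are below) =====
def Claim_equal_combinar_literal_con_operacion : Prop := ∀ (cuadruplas : List (String × String × String × String)), Dom_combinar_literal_con_operacion cuadruplas → Spec_combinar_literal_con_operacion cuadruplas (combinar_literal_con_operacion cuadruplas)

-- ===== LEMMAS AND PROOFS =====

-- A appends a non-literal head and moves on.
theorem combinarA_not_literal (q : String × String × String × String)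
    (rest : List (String × String × String × String)) (h : (q.1 == "literal") = false) :
    combinarA (q :: rest) = q :: combinarA rest := by
  cases rest with
  | nil => simp [combinarA]
  | cons q2 rest' => simp [combinarA, h]

-- Joint invariant: with an empty buffer B computes A's result, and with a pending
-- literal p it computes A's result on p :: l.
theorem combinar_key : ∀ (n : Nat) (l : List (String × String × String × String)), l.length ≤ n →
    (combinarB none l = combinarA l) ∧
    (∀ p, (p.1 == "literal") = true → combinarB (some p) l = combinarA (p :: l)) := by
  intro n
  induction n with
  | zero =>
    intro l hl
    have : l = [] := List.eq_nil_of_length_eq_zero (Nat.le_zero.mp hl)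
    subst this
    refine ⟨by simp [combinarB, combinarA], ?_⟩
    intro p _; simp [combinarB, combinarA]
  | succ m ih =>
    intro l hl
    cases l with
    | nil =>
      refine ⟨by simp [combinarB, combinarA], ?_⟩
      intro p _; simp [combinarB, combinarA]
    | cons q rest =>
      have hrest : rest.length ≤ m := Nat.le_of_succ_le_succ hl
      obtain ⟨ih1, ih2⟩ := ih rest hrest
      constructor
      · -- empty buffer
        by_cases hq : (q.1 == "literal") = true
        · simpa [combinarB, hq] using ih2 q hq
        · have hq' : (q.1 == "literal") = false := by simpa using hq
          rw [combinarA_not_literal q rest hq']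
          simp [combinarB, hq', ih1]
      · -- pending literal p
        intro p hp
        by_cases hc : ((q.1 == "pinMode" || q.1 == "OUT" || q.1 == "readPin") && q.2.2.1 == p.2.2.2) = true
        · -- combine
          have hc' : (q.2.2.1 == p.2.2.2 && (q.1 == "pinMode" || q.1 == "OUT" || q.1 == "readPin")) = true := by
            simp only [Bool.and_eq_true] at hc ⊢; exact ⟨hc.2, hc.1⟩
          simp only [combinarB, hc, if_true, ih1]
          simp only [combinarA, hp, hc', if_true]
          congr 1
          split_ifs <;> rfl
        · by_cases hq : (q.1 == "literal") = true
          · -- flush p, pend q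
            have hA : combinarA (p :: q :: rest) = p :: combinarA (q :: rest) := by
              simp only [combinarA, hp, if_true]
              have : (q.2.2.1 == p.2.2.2 && (q.1 == "pinMode" || q.1 == "OUT" || q.1 == "readPin")) = false := by
                simp only [Bool.and_eq_true] at hc
                by_contra h
                simp only [Bool.not_eq_false, Bool.and_eq_true] at h
                exact hc ⟨h.2, h.1⟩
              simp [this]
            rw [hA]
            simp [combinarB, hc, hq, ih2 q hq]
          · -- flush p, append q
            have hq' : (q.1 == "literal") = false := by simpa using hq
            have hA : combinarA (p :: q :: rest) = p :: combinarA (q :: rest) := by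
              simp only [combinarA, hp, if_true]
              have : (q.2.2.1 == p.2.2.2 && (q.1 == "pinMode" || q.1 == "OUT" || q.1 == "readPin")) = false := by
                simp only [Bool.and_eq_true] at hc
                by_contra h
                simp only [Bool.not_eq_false, Bool.and_eq_true] at h
                exact hc ⟨h.2, h.1⟩
              simp [this]
            rw [hA, combinarA_not_literal q rest hq']
            simp [combinarB, hc, hq', ih1]

-- ===== VERDICT (by name: the statement is the Claim_ definition above) =====
theorem combinar_literal_con_operacion_spec : Claim_equal_combinar_literal_con_operacion := by
  intro l _
  unfold Spec_combinar_literal_con_operacion combinar_literal_con_operacion combinar_literal_con_operacion_alt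
  exact ((combinar_key l.length l (Nat.le_refl _)).1).symm
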